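-- pv_equiv track=rewrite | github.com/mcrowson/advent_of_code_2022 | day6.py | decreasing_buffer
-- ===== SOURCE A (Python) =====
-- def decreasing_buffer(msg, msg_len):
--     end = msg_len
--     buffer = msg[:end]
--
--     while buffer:
--         cmp, buffer = buffer[0], buffer[1:]
--         if cmp in buffer:
--             end += 1
--             buffer = msg[end - msg_len : end]
--
--     return end
-- ===== SOURCE B (Python) =====
-- def decreasing_buffer(msg, msg_len):
--     if msg_len <= 0:
--         return msg_len
--     start = 0      # smallest s with msg[s:i+1] all-distinct
--     last = {}      # last seen index of each char
--     for i, c in enumerate(msg):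
--         j = last.get(c, -1)
--         if j >= start:
--             start = j + 1
--         last[c] = i
--         if i + 1 - msg_len >= start:
--             return i + 1
--     return start + msg_len
-- ===== Notes on version B (the rewrite author's own statement) =====
-- stated objective: faster
-- what changed: A restarts and rescans a fresh window slice after every duplicate (quadratic in the window length); B makes one left-to-right pass keeping a last-seen-index dict and the earliest valid window start, with a closed-form answer for the clipped tail windows; Pre_ keeps to the natural domain of nonnegative window lengths.
-- outside the precondition, e.g. on decreasing_buffer('aab', -1): A returns 0, B returns -1
import Mathlib
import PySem

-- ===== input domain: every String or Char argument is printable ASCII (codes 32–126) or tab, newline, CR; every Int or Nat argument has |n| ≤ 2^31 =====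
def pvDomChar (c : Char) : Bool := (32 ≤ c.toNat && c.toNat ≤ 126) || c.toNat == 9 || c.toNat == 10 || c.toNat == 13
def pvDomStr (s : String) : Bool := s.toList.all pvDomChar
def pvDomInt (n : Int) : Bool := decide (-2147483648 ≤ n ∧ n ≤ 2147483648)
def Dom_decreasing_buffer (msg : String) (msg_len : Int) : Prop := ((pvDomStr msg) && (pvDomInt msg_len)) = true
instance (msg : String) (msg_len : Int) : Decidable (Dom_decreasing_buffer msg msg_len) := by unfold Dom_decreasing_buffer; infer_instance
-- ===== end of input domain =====

-- B replaces A's restart-and-rescan loop (O(n·msg_len²)) by a single left-to-right pass that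
-- maintains a last-seen-index dict and the earliest all-distinct window start (objective: faster).

-- ===== PORT A =====
-- while loop of A; state = (end, buffer); 'cmp in buffer' on a 1-char string is char membership.
-- The Nat fuel is only a structural totality guard: (|msg|+2)^2 bounds the loop's step count
-- (proved in pvLoopA_reach below), so the recursion is A's while loop, step for step.
def pvLoopA (cs : List Char) (L : Int) : Nat → Int → List Char → Int
  | 0, e, _ => e
  | _ + 1, e, [] => e
  | fuel + 1, e, cmp :: rest =>
    if cmp ∈ rest then
      pvLoopA cs L fuel (e + 1) (PySem.List.slice cs (some (e + 1 - L)) (some (e + 1)))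
    else
      pvLoopA cs L fuel e rest

def decreasing_buffer (msg : String) (msg_len : Int) : Int :=
  pvLoopA msg.toList msg_len ((msg.toList.length + 2) * (msg.toList.length + 2)) msg_len
    (PySem.List.slice msg.toList none (some msg_len))

-- ===== PORT B =====
-- single pass of Source B: i,c over enumerate(msg), dict 'last' of last-seen indices, 'start' =
-- earliest start of an all-distinct window ending at the current position
def pvLoopB (L : Int) (buf : List Char) (i : Int) (start : Int) (last : PySem.Dict Char Int) : Int :=
  match buf with
  | [] => start + L
  | c :: rest =>
    let j := PySem.Dict.getD last c (-1)
    let start' := if start ≤ j then j + 1 else start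
    let last' := PySem.Dict.insert last c i
    if start' ≤ i + 1 - L then i + 1 else pvLoopB L rest (i + 1) start' last'

def decreasing_buffer_alt (msg : String) (msg_len : Int) : Int :=
  if msg_len ≤ 0 then msg_len
  else pvLoopB msg_len msg.toList 0 0 PySem.Dict.empty

-- ===== PRECONDITION & SPEC =====
-- Pre_ restricts to the task's natural domain: a window length is a nonnegative count. For
-- negative msg_len A still returns (its value follows Python's negative-slice wraparound,
-- e.g. A('aab', -1) = 0) while B's guard returns msg_len there.
def Pre_decreasing_buffer (msg : String) (msg_len : Int) : Prop := 0 ≤ msg_len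
instance (msg : String) (msg_len : Int) : Decidable (Pre_decreasing_buffer msg msg_len) := by
  unfold Pre_decreasing_buffer; infer_instance

def pvWitness_decreasing_buffer : String × Int := ("abac", 3)

def Spec_decreasing_buffer (msg : String) (msg_len : Int) (out : Int) : Prop := out = decreasing_buffer_alt msg msg_len
instance (msg : String) (msg_len : Int) (out : Int) : Decidable (Spec_decreasing_buffer msg msg_len out) := by unfold Spec_decreasing_buffer; infer_instance

-- ===== CLAIM (what is proved, stated in full; the proofs are below) =====
def Claim_equal_decreasing_buffer : Prop := ∀ (msg : String) (msg_len : Int), Dom_decreasing_buffer msg msg_len → Pre_decreasing_buffer msg msg_len → Spec_decreasing_buffer msg msg_len (decreasing_buffer msg msg_len)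

-- ===== LEMMAS AND PROOFS =====

-- the window of length L ending at e (Python slice semantics; for 0 ≤ L ≤ e it is clamped take/drop)
def pvWin (cs : List Char) (L e : Int) : List Char :=
  PySem.List.slice cs (some (e - L)) (some e)

lemma pvWin_eq_drop_take (cs : List Char) (L e : Int) (hL : 0 ≤ L) (he : L ≤ e) :
    pvWin cs L e = (cs.take e.toNat).drop (e - L).toNat := by
  unfold pvWin
  rw [PySem.List.slice_toNat cs (by omega) (by omega), List.drop_take]

-- a window is a slice of msg, so never longer than msg
lemma pvWin_length_le (cs : List Char) (L e : Int) : (pvWin cs L e).length ≤ cs.length := by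
  unfold pvWin
  have h := PySem.List.length_slice cs (e - L) e
  have h1 := PySem.List.clampIdx_le cs.length e
  omega

-- A's loop pops straight through a duplicate-free buffer and returns end unchanged
lemma pvLoopA_of_nodup (cs : List Char) (L : Int) :
    ∀ (buf : List Char) (fuel : Nat) (e : Int), buf.Nodup → buf.length < fuel →
      pvLoopA cs L fuel e buf = e := by
  intro buf
  induction buf with
  | nil =>
    intro fuel e _ hf
    cases fuel with
    | zero => omega
    | succ f => rw [pvLoopA]
  | cons cmp rest ih =>
    intro fuel e h hf
    cases fuel with
    | zero => simp at hf
    | succ f =>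
      rw [pvLoopA, if_neg (List.nodup_cons.mp h).1]
      exact ih f e (List.nodup_cons.mp h).2 (by simp at hf; omega)

-- on a buffer with a duplicate, A's loop restarts with the next window, burning at most
-- |buffer| units of fuel
lemma pvLoopA_restart (cs : List Char) (L : Int) :
    ∀ (buf : List Char) (fuel : Nat) (e : Int), ¬ buf.Nodup → buf.length ≤ fuel →
      ∃ fuel' : Nat, fuel - buf.length ≤ fuel' ∧
        pvLoopA cs L fuel e buf = pvLoopA cs L fuel' (e + 1) (pvWin cs L (e + 1)) := by
  intro buf
  induction buf with
  | nil => intro fuel e h _; exact absurd List.nodup_nil h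
  | cons cmp rest ih =>
    intro fuel e h hf
    cases fuel with
    | zero => simp at hf
    | succ f =>
      rw [pvLoopA]
      by_cases hm : cmp ∈ rest
      · rw [if_pos hm]
        exact ⟨f, by simp only [List.length_cons]; omega, rfl⟩
      · rw [if_neg hm]
        obtain ⟨fuel', h1, h2⟩ :=
          ih f e (fun hn => h (List.nodup_cons.mpr ⟨hm, hn⟩)) (by simp at hf; omega)
        exact ⟨fuel', by simp only [List.length_cons]; omega, h2⟩

-- A's loop started at e with enough fuel reaches the least duplicate-free window end r
lemma pvLoopA_reach (cs : List Char) (L : Int) (r : Int)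
    (hr : (pvWin cs L r).Nodup)
    (hmin : ∀ e : Int, L ≤ e → e < r → ¬ (pvWin cs L e).Nodup) :
    ∀ (e : Int) (fuel : Nat), L ≤ e → e ≤ r →
      (r - e).toNat * (cs.length + 2) + cs.length + 2 ≤ fuel →
      pvLoopA cs L fuel e (pvWin cs L e) = r := by
  suffices h : ∀ (k : Nat) (e : Int) (fuel : Nat), (r - e).toNat = k → L ≤ e → e ≤ r →
      (r - e).toNat * (cs.length + 2) + cs.length + 2 ≤ fuel →
      pvLoopA cs L fuel e (pvWin cs L e) = r by
    intro e fuel h1 h2 h3; exact h (r - e).toNat e fuel rfl h1 h2 h3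
  intro k
  induction k with
  | zero =>
    intro e fuel hk h1 h2 hfuel
    have : e = r := by omega
    subst this
    exact pvLoopA_of_nodup cs L _ fuel e hr
      (by have := pvWin_length_le cs L e; omega)
  | succ k ih =>
    intro e fuel hk h1 h2 hfuel
    have hlt : e < r := by omega
    obtain ⟨fuel', hge, heq⟩ := pvLoopA_restart cs L (pvWin cs L e) fuel e (hmin e h1 hlt)
      (by have := pvWin_length_le cs L e; omega)
    rw [heq]
    apply ih (e + 1) fuel' (by omega) (by omega) (by omega)
    have hwl := pvWin_length_le cs L e
    have hk1 : (r - e).toNat = k + 1 := hk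
    have hk2 : (r - (e + 1)).toNat = k := by omega
    rw [hk2]
    rw [hk1, Nat.succ_mul] at hfuel
    omega

-- B's loop invariants: start is the least admissible window start for the processed prefix,
-- and the dict holds each character's last index in that prefix
lemma pvLoopB_good (cs : List Char) (L : Int) (hL : 1 ≤ L) :
    ∀ (k : Nat) (i : Nat) (start : Int) (last : PySem.Dict Char Int),
      cs.length - i = k →
      0 ≤ start → start ≤ (i : Int) →
      (∀ a : Nat, ((cs.take i).drop a).Nodup ↔ start ≤ (a : Int)) →
      (∀ (c : Char) (a : Nat), ((a : Int) ≤ PySem.Dict.getD last c (-1)) ↔ c ∈ (cs.take i).drop a) →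
      (∀ e : Int, L ≤ e → e ≤ (i : Int) → ¬ (pvWin cs L e).Nodup) →
      L ≤ pvLoopB L (cs.drop i) i start last ∧
      (pvWin cs L (pvLoopB L (cs.drop i) i start last)).Nodup ∧
      (∀ e : Int, L ≤ e → e < pvLoopB L (cs.drop i) i start last → ¬ (pvWin cs L e).Nodup) := by
  intro k
  induction k with
  | zero =>
    intro i start last hk h0 hle hI1 hI2 hfail
    have hni : cs.length ≤ i := by omega
    have hdrop : cs.drop i = [] := List.drop_eq_nil_iff.mpr hni
    have htake : cs.take i = cs := List.take_of_length_le hni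
    rw [hdrop, pvLoopB]
    simp only [htake] at hI1
    have hni' : ((cs.length : Int)) ≤ (i : Int) := by exact_mod_cast hni
    have hbig : (cs.length : Int) < start + L := by
      by_cases hnL : L ≤ (cs.length : Int)
      · have hf := hfail (cs.length : Int) hnL (by omega)
        rw [pvWin_eq_drop_take cs L (cs.length : Int) (by omega) hnL] at hf
        have h1 : ((cs.length : Int)).toNat = cs.length := by omega
        rw [h1, List.take_length] at hf
        have h2 := (hI1 ((cs.length : Int) - L).toNat).not.mp hf
        omega
      · omega
    refine ⟨by omega, ?_, ?_⟩
    · rw [pvWin_eq_drop_take cs L (start + L) (by omega) (by omega)]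
      rw [List.take_of_length_le (by omega)]
      have h1 : (start + L) - L = start := by ring
      rw [h1]
      have h2 : ((start.toNat : Nat) : Int) = start := by omega
      have := (hI1 start.toNat).mpr (by omega)
      have h3 : start.toNat = start.toNat := rfl
      exact this
    · intro e hLe hlt
      by_cases hen : e ≤ (cs.length : Int)
      · exact hfail e hLe (by omega)
      · rw [pvWin_eq_drop_take cs L e (by omega) hLe]
        rw [List.take_of_length_le (by omega)]
        intro hnd
        have := (hI1 (e - L).toNat).mp hnd
        omega
  | succ k ih =>
    intro i start last hk h0 hle hI1 hI2 hfail
    have hi : i < cs.length := by omega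
    have hdrop : cs.drop i = cs[i] :: cs.drop (i + 1) := List.drop_eq_getElem_cons hi
    have hlen_take : (cs.take i).length = i := by simp [List.length_take]; omega
    have htake1 : cs.take (i + 1) = cs.take i ++ [cs[i]] := by
      rw [List.take_add_one]
      simp [List.getElem?_eq_getElem hi]
    have hjlt : PySem.Dict.getD last cs[i] (-1) < (i : Int) := by
      by_contra hcon
      have hmem := (hI2 cs[i] i).mp (by omega)
      have : (cs.take i).drop i = [] := List.drop_eq_nil_iff.mpr (by omega)
      rw [this] at hmem
      exact List.not_mem_nil hmem
    rw [hdrop, pvLoopB]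
    set j := PySem.Dict.getD last cs[i] (-1) with hj
    set st' := (if start ≤ j then j + 1 else start) with hst'
    set last' := PySem.Dict.insert last cs[i] (i : Int) with hlast'
    have hst'0 : 0 ≤ st' := by rw [hst']; split_ifs <;> omega
    have hst'le : st' ≤ (i : Int) := by rw [hst']; split_ifs <;> omega
    -- new start invariant
    have hI1' : ∀ a : Nat, ((cs.take (i + 1)).drop a).Nodup ↔ st' ≤ (a : Int) := by
      intro a
      rw [htake1]
      by_cases ha : a ≤ i
      · rw [List.drop_append_of_le_length (by omega)]
        have hsplit : (((cs.take i).drop a) ++ [cs[i]]).Nodup ↔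
            ((cs.take i).drop a).Nodup ∧ cs[i] ∉ (cs.take i).drop a := by
          simp only [List.nodup_append, List.nodup_cons, List.not_mem_nil, not_false_iff,
            List.nodup_nil, and_true, true_and]
          constructor
          · rintro ⟨h1, h2⟩
            exact ⟨h1, fun hmem => h2 cs[i] hmem cs[i] (List.mem_singleton_self _) rfl⟩
          · rintro ⟨h1, h2⟩
            refine ⟨h1, fun x hx b hb hxb => ?_⟩
            rw [List.mem_singleton] at hb
            subst hb
            exact h2 (hxb ▸ hx)
        rw [hsplit, hI1 a, ← hI2 cs[i] a, ← hj, hst']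
        split_ifs <;> omega
      · have hnil : ((cs.take i) ++ [cs[i]]).drop a = [] :=
          List.drop_eq_nil_iff.mpr (by simp; omega)
        rw [hnil]
        exact ⟨fun _ => by omega, fun _ => List.nodup_nil⟩
    -- new last-seen invariant
    have hI2' : ∀ (c' : Char) (a : Nat),
        ((a : Int) ≤ PySem.Dict.getD last' c' (-1)) ↔ c' ∈ (cs.take (i + 1)).drop a := by
      intro c' a
      rw [htake1, hlast', PySem.Dict.getD_insert]
      by_cases hc : c' = cs[i]
      · rw [if_pos hc]
        by_cases ha : a ≤ i
        · rw [List.drop_append_of_le_length (by omega)]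
          exact ⟨fun _ => List.mem_append_right _ (by simp [hc]), fun _ => by omega⟩
        · rw [List.drop_eq_nil_iff.mpr (by simp; omega)]
          exact ⟨fun h => by omega, fun h => absurd h (List.not_mem_nil)⟩
      · rw [if_neg hc]
        by_cases ha : a ≤ i
        · rw [List.drop_append_of_le_length (by omega), hI2 c' a]
          simp [hc]
        · rw [List.drop_eq_nil_iff.mpr (by simp; omega)]
          have h1 : (cs.take i).drop a = [] := List.drop_eq_nil_iff.mpr (by omega)
          rw [hI2 c' a, h1]
      -- note: the i+1 prefix facts above are exactly Source B's dict/start update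
    split_ifs with hcond
    · -- early return at end = i + 1
      refine ⟨by omega, ?_, ?_⟩
      · rw [pvWin_eq_drop_take cs L ((i : Int) + 1) (by omega) (by omega)]
        have h1 : ((i : Int) + 1).toNat = i + 1 := by omega
        rw [h1]
        exact (hI1' ((i : Int) + 1 - L).toNat).mpr (by omega)
      · intro e hLe hlt
        exact hfail e hLe (by omega)
    · -- recurse on the rest of the string
      have hfail' : ∀ e : Int, L ≤ e → e ≤ ((i + 1 : Nat) : Int) → ¬ (pvWin cs L e).Nodup := by
        intro e hLe he
        by_cases hei : e ≤ (i : Int)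
        · exact hfail e hLe hei
        · have he1 : e = (i : Int) + 1 := by push_cast at he; omega
          rw [pvWin_eq_drop_take cs L e (by omega) hLe]
          intro hnd
          have he2 : e.toNat = i + 1 := by omega
          rw [he2] at hnd
          have := (hI1' (e - L).toNat).mp hnd
          omega
      have hrec := ih (i + 1) st' last' (by omega) hst'0 (by push_cast; omega)
        hI1' hI2' hfail'
      have hcast : ((i + 1 : Nat) : Int) = (i : Int) + 1 := by push_cast; ring
      rw [hcast] at hrec
      exact hrec

-- ===== VERDICT (by name: the statement is the Claim_ definition above) =====
theorem decreasing_buffer_spec : Claim_equal_decreasing_buffer := by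
  intro msg L _ hpre
  unfold Pre_decreasing_buffer at hpre
  unfold Spec_decreasing_buffer decreasing_buffer decreasing_buffer_alt
  have hfuelpos : 0 < (msg.toList.length + 2) * (msg.toList.length + 2) :=
    Nat.mul_pos (by omega) (by omega)
  by_cases hL0 : L ≤ 0
  · have hz : L = 0 := le_antisymm hL0 hpre
    subst hz
    rw [if_pos le_rfl, PySem.List.slice_to msg.toList (by omega)]
    simp only [Int.toNat_zero, List.take_zero]
    exact pvLoopA_of_nodup msg.toList 0 [] _ 0 List.nodup_nil (by simpa using hfuelpos)
  · have hL : 1 ≤ L := by omega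
    rw [if_neg hL0]
    obtain ⟨hge, hnd, hmin⟩ := pvLoopB_good msg.toList L hL msg.toList.length 0 0
      PySem.Dict.empty (by omega) le_rfl (by simp)
      (by intro a; simp)
      (by intro c a; rw [PySem.Dict.getD_empty]; simp; omega)
      (by intro e h1 h2 hnd; simp at h2; omega)
    simp only [List.drop_zero, Nat.cast_zero] at hge hnd hmin
    have hbuf : PySem.List.slice msg.toList none (some L) = pvWin msg.toList L L := by
      unfold pvWin
      rw [show L - L = (0 : Int) by ring, PySem.List.slice_zero_start]
    rw [hbuf]
    set cs := msg.toList with hcs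
    set r := pvLoopB L cs 0 0 PySem.Dict.empty with hrdef
    -- the answer is at most |msg| + L, hence the chosen fuel suffices
    have htop : (pvWin cs L ((cs.length : Int) + L)).Nodup := by
      rw [pvWin_eq_drop_take cs L _ (by omega) (by omega),
        show ((cs.length : Int) + L - L) = (cs.length : Int) by ring]
      rw [List.drop_eq_nil_iff.mpr (by simp [List.length_take])]
      exact List.nodup_nil
    have hrle : r ≤ (cs.length : Int) + L := by
      by_contra hcon
      exact hmin ((cs.length : Int) + L) (by omega) (by omega) htop
    apply pvLoopA_reach cs L r hnd hmin L _ le_rfl hge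
    have hA : (r - L).toNat ≤ cs.length + 1 := by omega
    calc (r - L).toNat * (cs.length + 2) + cs.length + 2
        ≤ (cs.length + 1) * (cs.length + 2) + cs.length + 2 :=
          Nat.add_le_add_right (Nat.add_le_add_right (Nat.mul_le_mul_right _ hA) _) _
      _ = (cs.length + 2) * (cs.length + 2) := by ring
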